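-- pv_equiv track=rewrite | github.com/Tart1lya/labs_asd | lab4/task11/src/task11.py | process_queue
-- ===== SOURCE A (Python) =====
-- from collections import deque
--
-- def process_queue(n, m, a):
--     """
--     Функция вычисляет состояние очереди после завершения выдачи m справок.
--
--     :param n: Количество посетителей в очереди.
--     :param m: Общее количество справок, которое министерство может выдать.
--     :param a: Список чисел, где a[i] — количество справок, которые нужны i-му посетителю.
--     :return: Количество оставшихся в очереди посетителей и их оставшиеся справки.
--     """
--     queue = deque((i, a[i]) for i in range(n))
--     remaining_docs = m  # Сколько справок осталось выдать
--
--     while queue and remaining_docs > 0: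
--         idx, docs_needed = queue.popleft()
--         if docs_needed > 1:
--             queue.append((idx, docs_needed - 1))  # Возвращаем в конец очереди с уменьшенным числом справок
--         remaining_docs -= 1
--
--     if not queue:
--         return -1, []
--     remaining_people = len(queue)
--     remaining_a = [docs for _, docs in queue]
--
--     return remaining_people, remaining_a
-- ===== SOURCE B (Python) =====
-- def process_queue(n, m, a):
--     # Batched round-robin: whole rounds are applied at once (subtract `rounds`
--     # from everyone, drop the finished), the final partial round is a slice.
--     queue = [a[i] for i in range(n)]
--     docs = m
--     while queue and docs >= len(queue):
--         q = len(queue)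
--         rounds = min(docs // q, min(max(d, 1) for d in queue))
--         queue = [d - rounds for d in queue if d > rounds]
--         docs -= rounds * q
--     if not queue:
--         return -1, []
--     k = docs if docs > 0 else 0
--     rest = queue[k:] + [d - 1 for d in queue[:k] if d > 1]
--     return len(rest), rest
-- ===== Notes on version B (the rewrite author's own statement) =====
-- stated objective: faster
-- what changed: A serves one document at a time round-robin on a deque (O(min(m, sum)) steps); B jumps over whole rounds at once (subtracting min(m//len, min need) from every survivor and filtering), then resolves the final partial round in closed form with slices.
import Mathlib
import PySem

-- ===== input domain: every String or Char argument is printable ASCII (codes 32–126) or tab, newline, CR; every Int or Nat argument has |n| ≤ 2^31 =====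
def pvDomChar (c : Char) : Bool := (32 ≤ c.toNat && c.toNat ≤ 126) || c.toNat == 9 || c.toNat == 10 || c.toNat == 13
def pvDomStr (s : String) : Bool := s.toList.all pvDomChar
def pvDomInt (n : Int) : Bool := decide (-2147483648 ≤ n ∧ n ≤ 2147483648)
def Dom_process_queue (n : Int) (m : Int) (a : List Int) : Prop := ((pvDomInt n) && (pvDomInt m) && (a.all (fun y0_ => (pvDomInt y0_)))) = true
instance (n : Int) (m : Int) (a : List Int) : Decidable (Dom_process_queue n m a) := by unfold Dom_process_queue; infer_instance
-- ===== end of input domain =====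

-- B replaces A's one-service-at-a-time deque simulation by batched full rounds
-- (subtract `rounds` from everybody at once) plus a closed-form partial round via
-- slices; equal return values are proved on Pre_ (n ≤ len(a)).

-- ===== PORT A =====
def pqLoopA (queue : List (Int × Int)) (remaining : Int) : List (Int × Int) :=
  match queue with
  | [] => []
  | (idx, d) :: rest =>
    if _h : 0 < remaining then
      pqLoopA (if d > 1 then rest ++ [(idx, d - 1)] else rest) (remaining - 1)
    else (idx, d) :: rest
termination_by remaining.toNat
decreasing_by omega

def process_queue (n : Int) (m : Int) (a : List Int) : Int × List Int :=
  let queue := pqLoopA ((PySem.List.pyRange 0 n 1).map (fun i => (i, PySem.List.pyGetD a i 0))) m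
  if queue = [] then (-1, [])
  else ((queue.length : Int), queue.map (fun p => p.2))

-- ===== PORT B =====
-- the comprehension '[d - r for d in q if d > r]' of Source B
def pqBatch (r : Int) (q : List Int) : List Int :=
  q.filterMap (fun d => if d > r then some (d - r) else none)

-- 'min(max(d, 1) for d in queue)' of Source B (queue is nonempty at the call site)
def pqMins (queue : List Int) : Int :=
  (PySem.List.min? (queue.map (fun d => max d 1)) (fun x => x)).getD 0

theorem pqMins_pos (x : Int) (rest : List Int) : 1 ≤ pqMins (x :: rest) := by
  unfold pqMins
  rcases h : PySem.List.min? ((x :: rest).map (fun d => max d 1)) (fun x => x) with _ | m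
  · rw [PySem.List.min?_eq_none_iff] at h
    simp at h
  · have hm := PySem.List.min?_mem h
    simp only [Option.getD_some]
    simp only [List.mem_map] at hm
    obtain ⟨d, _, hd⟩ := hm
    omega

theorem pqLoopB_dec (x : Int) (rest : List Int) (docs : Int)
    (h : docs ≥ ((x :: rest).length : Int)) :
    (docs - min (PySem.Int.floordiv docs ((x :: rest).length : Int)) (pqMins (x :: rest)) *
        ((x :: rest).length : Int)).toNat < docs.toNat := by
  set q : Int := ((x :: rest).length : Int) with hq
  have hq1 : 1 ≤ q := by rw [hq]; simp only [List.length_cons]; push_cast; omega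
  have hfd : 1 ≤ PySem.Int.floordiv docs q :=
    (PySem.Int.le_floordiv_iff_mul_le (by omega)).2 (by omega)
  have hfd2 : PySem.Int.floordiv docs q * q ≤ docs :=
    (PySem.Int.le_floordiv_iff_mul_le (by omega)).1 le_rfl
  have hmin := pqMins_pos x rest
  set r := min (PySem.Int.floordiv docs q) (pqMins (x :: rest)) with hr
  have hr1 : 1 ≤ r := le_min hfd hmin
  have hrq : r * q ≤ PySem.Int.floordiv docs q * q :=
    mul_le_mul_of_nonneg_right (min_le_left _ _) (by omega)
  have h1q : 1 * q ≤ r * q := mul_le_mul_of_nonneg_right hr1 (by omega)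
  omega

def pqLoopB (queue : List Int) (docs : Int) : List Int × Int :=
  match queue with
  | [] => ([], docs)
  | x :: rest =>
    if h : docs ≥ ((x :: rest).length : Int) then
      pqLoopB
        (pqBatch (min (PySem.Int.floordiv docs ((x :: rest).length : Int)) (pqMins (x :: rest))) (x :: rest))
        (docs - min (PySem.Int.floordiv docs ((x :: rest).length : Int)) (pqMins (x :: rest)) * ((x :: rest).length : Int))
    else (x :: rest, docs)
termination_by docs.toNat
decreasing_by exact pqLoopB_dec x rest docs h

def process_queue_alt (n : Int) (m : Int) (a : List Int) : Int × List Int :=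
  let res := pqLoopB ((PySem.List.pyRange 0 n 1).map (fun i => PySem.List.pyGetD a i 0)) m
  if res.1 = [] then (-1, [])
  else
    let k : Int := if res.2 > 0 then res.2 else 0
    let rest := PySem.List.slice res.1 (some k) ++ pqBatch 1 (PySem.List.slice res.1 none (some k))
    ((rest.length : Int), rest)

-- ===== PRECONDITION & SPEC =====
-- Pre_ excludes n > len(a), where Python A (and B alike) raise IndexError in the
-- initial comprehension 'a[i] for i in range(n)'; A returns on every other input.
def Pre_process_queue (n : Int) (m : Int) (a : List Int) : Prop := n ≤ (a.length : Int)
instance (n : Int) (m : Int) (a : List Int) : Decidable (Pre_process_queue n m a) := by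
  unfold Pre_process_queue; infer_instance
def pvWitness_process_queue : Int × Int × List Int := (3, 4, [2, 1, 3])

def Spec_process_queue (n : Int) (m : Int) (a : List Int) (out : Int × List Int) : Prop := out = process_queue_alt n m a
instance (n : Int) (m : Int) (a : List Int) (out : Int × List Int) : Decidable (Spec_process_queue n m a out) := by unfold Spec_process_queue; infer_instance

-- ===== CLAIM (what is proved, stated in full; the proofs are below) =====
def Claim_equal_process_queue : Prop := ∀ (n : Int) (m : Int) (a : List Int), Dom_process_queue n m a → Pre_process_queue n m a → Spec_process_queue n m a (process_queue n m a)

-- ===== LEMMAS AND PROOFS =====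

-- value-level version of A's loop (the indices A carries are spectators)
def vLoopA (queue : List Int) (remaining : Int) : List Int :=
  match queue with
  | [] => []
  | d :: rest =>
    if _h : 0 < remaining then
      vLoopA (if d > 1 then rest ++ [d - 1] else rest) (remaining - 1)
    else d :: rest
termination_by remaining.toNat
decreasing_by omega

theorem map_snd_pqLoopA (queue : List (Int × Int)) (remaining : Int) :
    (pqLoopA queue remaining).map (fun p => p.2) = vLoopA (queue.map (fun p => p.2)) remaining := by
  induction queue, remaining using pqLoopA.induct with
  | case1 remaining => simp [pqLoopA, vLoopA]
  | case2 remaining idx d rest h ih =>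
    rw [pqLoopA]
    simp only [List.map_cons]
    rw [vLoopA, dif_pos h, dif_pos h]
    simp only [dite_eq_ite] at ih
    rw [ih]
    congr 1
    split_ifs <;> simp
  | case3 remaining idx d rest h =>
    rw [pqLoopA]
    simp only [List.map_cons]
    rw [vLoopA, dif_neg h, dif_neg h]
    simp

theorem vLoopA_nonpos (q : List Int) (r : Int) (h : r ≤ 0) : vLoopA q r = q := by
  cases q with
  | nil => simp [vLoopA]
  | cons d rest => rw [vLoopA, dif_neg (by omega)]

-- one full round: the first q.length services rotate q to the back, decremented/filtered
theorem vLoopA_round (q t : List Int) (docs : Int) (h : (q.length : Int) ≤ docs) :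
    vLoopA (q ++ t) docs = vLoopA (t ++ pqBatch 1 q) (docs - q.length) := by
  induction q generalizing t docs with
  | nil => simp [pqBatch]
  | cons d q' ih =>
    have hd0 : 0 < docs := by
      simp only [List.length_cons] at h; push_cast at h; omega
    rw [List.cons_append, vLoopA, dif_pos hd0]
    by_cases hd : d > 1
    · rw [if_pos hd]
      rw [show (q' ++ t) ++ [d - 1] = q' ++ (t ++ [d - 1]) by simp]
      rw [ih (t ++ [d - 1]) (docs - 1)
        (by simp only [List.length_cons] at h; push_cast at h; omega)]
      have hb : pqBatch 1 (d :: q') = (d - 1) :: pqBatch 1 q' := by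
        simp [pqBatch, hd]
      rw [hb]
      congr 1
      · simp
      · simp only [List.length_cons]; push_cast; ring
    · rw [if_neg hd]
      rw [ih t (docs - 1)
        (by simp only [List.length_cons] at h; push_cast at h; omega)]
      have hb : pqBatch 1 (d :: q') = pqBatch 1 q' := by
        simp [pqBatch, hd]
      rw [hb]
      congr 1
      simp only [List.length_cons]; push_cast; ring

-- partial round in closed form
theorem vLoopA_partial (q : List Int) (docs : Int) (h : docs.toNat ≤ q.length) :
    vLoopA q docs = q.drop docs.toNat ++ pqBatch 1 (q.take docs.toNat) := by
  by_cases h0 : docs ≤ 0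
  · rw [vLoopA_nonpos q docs h0]
    have : docs.toNat = 0 := by omega
    simp [this, pqBatch]
  · conv_lhs => rw [← List.take_append_drop docs.toNat q]
    rw [vLoopA_round (q.take docs.toNat) (q.drop docs.toNat) docs
      (by rw [List.length_take]; omega)]
    rw [vLoopA_nonpos _ _ (by rw [List.length_take]; omega)]

-- batching r ≤ min over q of max(d,1) full rounds at once
theorem vLoopA_batch (fuel : Nat) (r : Int) (q : List Int) (docs : Int)
    (hf : r.toNat ≤ fuel) (h1 : 1 ≤ r) (hmin : ∀ d ∈ q, r ≤ max d 1)
    (hd : r * q.length ≤ docs) :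
    vLoopA q docs = vLoopA (pqBatch r q) (docs - r * q.length) := by
  induction fuel generalizing r q docs with
  | zero => omega
  | succ fuel ih =>
    cases q with
    | nil => simp [pqBatch, vLoopA]
    | cons x q' =>
      set L : Int := ((x :: q').length : Int) with hL
      have hL1 : 1 ≤ L := by rw [hL]; simp only [List.length_cons]; push_cast; omega
      have hlen : (1:Int) * L ≤ r * L := mul_le_mul_of_nonneg_right h1 (by omega)
      by_cases hr1 : r = 1
      · subst hr1
        have h0 := vLoopA_round (x :: q') [] docs (by rw [← hL]; linarith)
        simpa [← hL] using h0
      · have hr2 : 2 ≤ r := by omega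
        have hall : ∀ d ∈ (x :: q'), d > 1 := by
          intro d hdm
          have := hmin d hdm; omega
        have hround : pqBatch 1 (x :: q') = (x :: q').map (fun d => d - 1) := by
          unfold pqBatch
          rw [List.filterMap_congr (g := fun d => some (d - 1))
            (by intro d hdm; simp [hall d hdm])]
          simp
        have h0 := vLoopA_round (x :: q') [] docs (by rw [← hL]; linarith)
        simp only [List.append_nil, List.nil_append] at h0
        rw [h0, hround]
        rw [ih (r - 1) ((x :: q').map (fun d => d - 1)) (docs - (x :: q').length)
          (by omega) (by omega)
          (by
            intro d' hd'
            simp only [List.mem_map] at hd'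
            obtain ⟨d, hdm, rfl⟩ := hd'
            have h1' := hmin d hdm
            have h2' := hall d hdm
            omega)
          (by rw [List.length_map, ← hL]; nlinarith)]
        congr 1
        · unfold pqBatch
          rw [List.filterMap_map]
          apply List.filterMap_congr
          intro d _
          simp only [Function.comp]
          split_ifs with hA hB <;>
            first
              | (simp only [Option.some.injEq]; omega)
              | (exfalso; omega)
              | rfl
        · rw [List.length_map, ← hL]
          ring

theorem vLoopA_eq_fuel (fuel : Nat) (q : List Int) (docs : Int) (hf : docs.toNat ≤ fuel) :
    vLoopA q docs =
      (pqLoopB q docs).1.drop (pqLoopB q docs).2.toNat ++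
        pqBatch 1 ((pqLoopB q docs).1.take (pqLoopB q docs).2.toNat) := by
  induction fuel generalizing q docs with
  | zero =>
    cases q with
    | nil => rw [pqLoopB]; simp [vLoopA, pqBatch]
    | cons x rest =>
      have hle : ¬ docs ≥ ((x :: rest).length : Int) := by
        simp only [List.length_cons, ge_iff_le, not_le]; push_cast; omega
      rw [pqLoopB, dif_neg hle]
      exact vLoopA_partial _ _ (by simp only [List.length_cons]; omega)
  | succ fuel ih =>
    cases q with
    | nil => rw [pqLoopB]; simp [vLoopA, pqBatch]
    | cons x rest =>
      by_cases h : docs ≥ ((x :: rest).length : Int)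
      · rw [pqLoopB, dif_pos h]
        have hL1 : 1 ≤ ((x :: rest).length : Int) := by
          simp only [List.length_cons]; push_cast; omega
        have hfd : 1 ≤ PySem.Int.floordiv docs ((x :: rest).length : Int) :=
          (PySem.Int.le_floordiv_iff_mul_le (by omega)).2 (by omega)
        have hfd2 : PySem.Int.floordiv docs ((x :: rest).length : Int) * ((x :: rest).length : Int) ≤ docs :=
          (PySem.Int.le_floordiv_iff_mul_le (by omega)).1 le_rfl
        have hr1 : 1 ≤ min (PySem.Int.floordiv docs ((x :: rest).length : Int)) (pqMins (x :: rest)) :=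
          le_min hfd (pqMins_pos x rest)
        have hmle : ∀ d ∈ (x :: rest),
            min (PySem.Int.floordiv docs ((x :: rest).length : Int)) (pqMins (x :: rest)) ≤ max d 1 := by
          intro d hdm
          have hle2 : pqMins (x :: rest) ≤ max d 1 := by
            unfold pqMins
            rcases hm : PySem.List.min? ((x :: rest).map (fun d => max d 1)) (fun x => x) with _ | mv
            · rw [PySem.List.min?_eq_none_iff] at hm
              simp at hm
            · have := PySem.List.min?_isMin hm (max d 1) (List.mem_map_of_mem hdm)
              simpa using this
          exact le_trans (min_le_right _ _) hle2
        have hrq : min (PySem.Int.floordiv docs ((x :: rest).length : Int)) (pqMins (x :: rest)) *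
            ((x :: rest).length : Int) ≤ PySem.Int.floordiv docs ((x :: rest).length : Int) * ((x :: rest).length : Int) :=
          mul_le_mul_of_nonneg_right (min_le_left _ _) (by omega)
        rw [vLoopA_batch (min (PySem.Int.floordiv docs ((x :: rest).length : Int)) (pqMins (x :: rest))).toNat
          _ (x :: rest) docs le_rfl hr1 hmle (by omega)]
        apply ih
        have := pqLoopB_dec x rest docs h
        omega
      · rw [pqLoopB, dif_neg h]
        exact vLoopA_partial _ _ (by simp only [List.length_cons, ge_iff_le, not_le] at h ⊢; omega)

theorem vLoopA_eq_pqLoopB (q : List Int) (docs : Int) (qf : List Int) (df : Int)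
    (h : pqLoopB q docs = (qf, df)) :
    vLoopA q docs = qf.drop df.toNat ++ pqBatch 1 (qf.take df.toNat) := by
  have h0 := vLoopA_eq_fuel docs.toNat q docs le_rfl
  rw [h] at h0
  exact h0

theorem pqLoopB_exit_fuel (fuel : Nat) (q : List Int) (docs : Int) (hf : docs.toNat ≤ fuel) :
    (pqLoopB q docs).1 = [] ∨ (pqLoopB q docs).2 < ((pqLoopB q docs).1.length : Int) := by
  induction fuel generalizing q docs with
  | zero =>
    cases q with
    | nil => rw [pqLoopB]; left; rfl
    | cons x rest =>
      have hle : ¬ docs ≥ ((x :: rest).length : Int) := by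
        simp only [List.length_cons, ge_iff_le, not_le]; push_cast; omega
      rw [pqLoopB, dif_neg hle]
      right
      simp only [List.length_cons, ge_iff_le, not_le] at hle ⊢
      push_cast
      omega
  | succ fuel ih =>
    cases q with
    | nil => rw [pqLoopB]; left; rfl
    | cons x rest =>
      by_cases h : docs ≥ ((x :: rest).length : Int)
      · rw [pqLoopB, dif_pos h]
        apply ih
        have := pqLoopB_dec x rest docs h
        omega
      · rw [pqLoopB, dif_neg h]
        right
        simp only [List.length_cons, ge_iff_le, not_le] at h ⊢
        push_cast
        omega

theorem pqLoopB_exit (q : List Int) (docs : Int) (qf : List Int) (df : Int)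
    (h : pqLoopB q docs = (qf, df)) : qf = [] ∨ df < (qf.length : Int) := by
  have h0 := pqLoopB_exit_fuel docs.toNat q docs le_rfl
  rw [h] at h0
  exact h0

-- ===== VERDICT (by name: the statement is the Claim_ definition above) =====
theorem process_queue_spec : Claim_equal_process_queue := by
  intro n m a _ _
  unfold Spec_process_queue process_queue process_queue_alt
  dsimp only
  have hA : (pqLoopA ((PySem.List.pyRange 0 n 1).map (fun i => (i, PySem.List.pyGetD a i 0))) m).map (fun p => p.2)
      = vLoopA ((PySem.List.pyRange 0 n 1).map (fun i => PySem.List.pyGetD a i 0)) m := by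
    rw [map_snd_pqLoopA, List.map_map]
    rfl
  rcases hres : pqLoopB ((PySem.List.pyRange 0 n 1).map (fun i => PySem.List.pyGetD a i 0)) m with ⟨qf, df⟩
  have hB := vLoopA_eq_pqLoopB _ _ _ _ hres
  dsimp only
  by_cases hq : qf = []
  · have hv : vLoopA ((PySem.List.pyRange 0 n 1).map (fun i => PySem.List.pyGetD a i 0)) m = [] := by
      rw [hB, hq]; simp [pqBatch]
    have hAnil : pqLoopA ((PySem.List.pyRange 0 n 1).map (fun i => (i, PySem.List.pyGetD a i 0))) m = [] := by
      have h1 := hA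
      rw [hv] at h1
      exact List.map_eq_nil_iff.1 h1
    rw [if_pos hAnil, if_pos hq]
  · rcases pqLoopB_exit _ _ _ _ hres with hx | hx
    · exact absurd hx hq
    · have hqlen : 0 < qf.length := by
        cases qf with
        | nil => exact absurd rfl hq
        | cons y ys => simp
      have hk : df.toNat < qf.length := by omega
      have hdropne : qf.drop df.toNat ≠ [] := by
        rw [Ne, List.drop_eq_nil_iff]; omega
      have hrest : (pqLoopA ((PySem.List.pyRange 0 n 1).map (fun i => (i, PySem.List.pyGetD a i 0))) m).map (fun p => p.2)
          = qf.drop df.toNat ++ pqBatch 1 (qf.take df.toNat) := hA.trans hB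
      have hAne : pqLoopA ((PySem.List.pyRange 0 n 1).map (fun i => (i, PySem.List.pyGetD a i 0))) m ≠ [] := by
        intro hnil
        rw [hnil, List.map_nil] at hrest
        exact hdropne (by
          have := hrest.symm
          rcases List.append_eq_nil_iff.1 this with ⟨h1, _⟩
          exact h1)
      rw [if_neg hAne, if_neg hq]
      rw [show (if df > 0 then df else 0) = ((df.toNat : Nat) : Int) by split_ifs <;> omega]
      rw [PySem.List.slice_from_natCast, PySem.List.slice_to_natCast]
      rw [← hrest, List.length_map]
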